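-- pv_equiv track=rewrite | github.com/GeoscienceAustralia/sira | sira/simulation.py | _distribute_hazards_mpi
-- ===== SOURCE A (Python) =====
-- def _distribute_hazards_mpi(total_hazards, mpi_size):
--     """
--     Distribute hazards across MPI ranks as evenly as possible.
--
--     Parameters:
--     -----------
--     total_hazards: Total number of hazards to distribute
--     mpi_size: Number of MPI processes
--
--     Returns:
--     --------
--     List of (start_idx, end_idx) tuples for each rank
--     """
--     hazards_per_rank = total_hazards // mpi_size
--     remainder = total_hazards % mpi_size
--
--     distribution = []
--     current_start = 0
--
--     for rank in range(mpi_size):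
--         if rank < remainder:
--             rank_count = hazards_per_rank + 1
--         else:
--             rank_count = hazards_per_rank
--
--         distribution.append((current_start, current_start + rank_count))
--         current_start += rank_count
--
--     return distribution
-- ===== SOURCE B (Python) =====
-- def _distribute_hazards_mpi(total_hazards, mpi_size):
--     """Closed-form per-rank index ranges: no running accumulator."""
--     q, r = divmod(total_hazards, mpi_size)
--     return [(k * q + min(k, r), (k + 1) * q + min(k + 1, r))
--             for k in range(mpi_size)]
-- ===== Notes on version B (the rewrite author's own statement) =====
-- stated objective: simpler
-- what changed: Replaced the running current_start accumulator loop by a comprehension computing each rank's start/end in closed form (k*q + min(k, r)).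
import Mathlib
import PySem

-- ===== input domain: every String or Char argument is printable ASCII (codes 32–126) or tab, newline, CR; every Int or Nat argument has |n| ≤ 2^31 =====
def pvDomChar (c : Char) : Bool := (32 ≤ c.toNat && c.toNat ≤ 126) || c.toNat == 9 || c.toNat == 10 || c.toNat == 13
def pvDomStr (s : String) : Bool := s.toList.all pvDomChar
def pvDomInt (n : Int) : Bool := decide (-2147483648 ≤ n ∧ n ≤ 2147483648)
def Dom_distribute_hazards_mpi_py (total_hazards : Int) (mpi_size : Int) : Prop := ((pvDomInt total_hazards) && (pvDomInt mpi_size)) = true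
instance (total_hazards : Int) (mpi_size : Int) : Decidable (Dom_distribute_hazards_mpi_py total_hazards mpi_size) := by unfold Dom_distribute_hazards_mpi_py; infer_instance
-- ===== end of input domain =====

-- B replaces A's running current_start accumulator by a closed-form start/end per rank (simpler decomposition).

-- ===== PORT A =====
-- literal port: floor division/mod, then a loop accumulating (distribution, current_start)
def distribute_hazards_mpi_py (total_hazards : Int) (mpi_size : Int) : List (Int × Int) :=
  let hazards_per_rank := PySem.Int.floordiv total_hazards mpi_size
  let remainder := PySem.Int.mod total_hazards mpi_size
  let st := (PySem.List.pyRange 0 mpi_size 1).foldl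
    (fun (st : List (Int × Int) × Int) rank =>
      let rank_count := if rank < remainder then hazards_per_rank + 1 else hazards_per_rank
      (st.1 ++ [(st.2, st.2 + rank_count)], st.2 + rank_count))
    ([], 0)
  st.1

-- ===== PORT B =====
-- literal port of Source B: divmod once, then a comprehension with closed-form endpoints
def distribute_hazards_mpi_py_alt (total_hazards : Int) (mpi_size : Int) : List (Int × Int) :=
  let q := PySem.Int.floordiv total_hazards mpi_size
  let r := PySem.Int.mod total_hazards mpi_size
  (PySem.List.pyRange 0 mpi_size 1).map
    (fun k => (k * q + min k r, (k + 1) * q + min (k + 1) r))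

-- ===== PRECONDITION & SPEC =====
-- Pre_ excludes exactly mpi_size = 0, where Python A raises ZeroDivisionError (B raises too).
def Pre_distribute_hazards_mpi_py (total_hazards : Int) (mpi_size : Int) : Prop := mpi_size ≠ 0
instance (total_hazards : Int) (mpi_size : Int) : Decidable (Pre_distribute_hazards_mpi_py total_hazards mpi_size) := by unfold Pre_distribute_hazards_mpi_py; infer_instance
def pvWitness_distribute_hazards_mpi_py : Int × Int := (10, 3)

def Spec_distribute_hazards_mpi_py (total_hazards : Int) (mpi_size : Int) (out : List (Int × Int)) : Prop := out = distribute_hazards_mpi_py_alt total_hazards mpi_size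
instance (total_hazards : Int) (mpi_size : Int) (out : List (Int × Int)) : Decidable (Spec_distribute_hazards_mpi_py total_hazards mpi_size out) := by unfold Spec_distribute_hazards_mpi_py; infer_instance

-- ===== CLAIM (what is proved, stated in full; the proofs are below) =====
def Claim_equal_distribute_hazards_mpi_py : Prop := ∀ (total_hazards : Int) (mpi_size : Int), Dom_distribute_hazards_mpi_py total_hazards mpi_size → Pre_distribute_hazards_mpi_py total_hazards mpi_size → Spec_distribute_hazards_mpi_py total_hazards mpi_size (distribute_hazards_mpi_py total_hazards mpi_size)

-- ===== LEMMAS AND PROOFS =====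

-- loop invariant: after processing range(0, n), the accumulator is the closed-form map
-- and current_start is n*q + min n r (needs 0 ≤ r, true for positive mpi_size).
lemma pv_loop_eq (q r : Int) (hr : 0 ≤ r) : ∀ n : Nat,
    (PySem.List.pyRange 0 (n : Int) 1).foldl
      (fun (st : List (Int × Int) × Int) rank =>
        let c := if rank < r then q + 1 else q
        (st.1 ++ [(st.2, st.2 + c)], st.2 + c))
      ([], 0)
    = ((PySem.List.pyRange 0 (n : Int) 1).map
        (fun k => (k * q + min k r, (k + 1) * q + min (k + 1) r)),
       (n : Int) * q + min (n : Int) r) := by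
  intro n
  induction n with
  | zero => simp [PySem.List.pyRange_one_eq_nil (by omega : (0:Int) ≤ 0), hr]
  | succ m ih =>
    have h : ((m + 1 : Nat) : Int) = (m : Int) + 1 := by push_cast; ring
    rw [h, PySem.List.pyRange_one_succ_right (by positivity), List.foldl_append,
      List.map_append, ih]
    simp only [List.foldl_cons, List.foldl_nil, List.map_cons, List.map_nil]
    by_cases hm : (m : Int) < r
    · have h1 : min (m : Int) r = m := by omega
      have h2 : min ((m : Int) + 1) r = (m : Int) + 1 := by omega
      simp [hm, h1]; ring
    · have h1 : min (m : Int) r = r := by omega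
      have h2 : min ((m : Int) + 1) r = r := by omega
      simp [hm, h1, h2]; ring

-- ===== VERDICT (by name: the statement is the Claim_ definition above) =====
theorem distribute_hazards_mpi_py_spec : Claim_equal_distribute_hazards_mpi_py := by
  intro t m _ hm
  unfold Spec_distribute_hazards_mpi_py distribute_hazards_mpi_py distribute_hazards_mpi_py_alt
  by_cases hpos : 0 < m
  · have hr : 0 ≤ PySem.Int.mod t m := by
      rw [PySem.Int.mod_eq_emod_of_pos hpos]
      exact Int.emod_nonneg t (by omega)
    have hn : m = ((m.toNat : Nat) : Int) := by omega
    rw [hn] at hr ⊢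
    exact congrArg Prod.fst
      (pv_loop_eq (PySem.Int.floordiv t ((m.toNat : Nat) : Int))
        (PySem.Int.mod t ((m.toNat : Nat) : Int)) hr m.toNat)
  · rw [PySem.List.pyRange_one_eq_nil (by omega : m ≤ 0)]
    simp
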